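-- pv_equiv track=rewrite | github.com/shvee-pandora/pnd-agents | src/agents/func_test_auto_agent/agent.py | _extract_categories_from_path
-- ===== SOURCE A (Python) =====
-- from typing import Optional, List, Dict, Any, Set
--
-- def _extract_categories_from_path(file_path: str) -> List[str]:
--     """Extract categories from file path."""
--     categories = []
--     path_parts = file_path.lower().split("/")
--
--     # Common category keywords
--     category_keywords = [
--         "user", "users", "product", "products", "cart", "checkout",
--         "order", "orders", "payment", "login", "registration",
--         "search", "navigation", "header", "footer", "account",
--     ]
--
--     for part in path_parts:
--         part_clean = part.replace(".json", "").replace("_", "-")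
--         for keyword in category_keywords:
--             if keyword in part_clean:
--                 categories.append(keyword)
--
--     return list(set(categories))
-- ===== SOURCE B (Python) =====
-- from typing import List
--
-- # Note: A returns list(set(...)), whose order is hash-seed dependent; B returns
-- # the same set of keywords as a deterministic sorted list (outputs compare as sets).
--
-- _CATEGORY_KEYWORDS = [
--     "user", "users", "product", "products", "cart", "checkout",
--     "order", "orders", "payment", "login", "registration",
--     "search", "navigation", "header", "footer", "account",
-- ]
--
--
-- def _extract_categories_from_path(file_path: str) -> List[str]:
--     """Extract categories from file path."""
--     # Cleaning commutes with splitting on "/" (neither ".json" nor "_"/"-"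
--     # contains "/"), and no keyword contains "/", so a keyword occurs in some
--     # cleaned part iff it occurs in the cleaned whole path.
--     cleaned = file_path.lower().replace(".json", "").replace("_", "-")
--     return sorted(k for k in _CATEGORY_KEYWORDS if k in cleaned)
-- ===== Notes on version B (the rewrite author's own statement) =====
-- stated objective: simpler
-- what changed: B cleans the whole lowered path once and does a single loop over the fixed keyword list testing substring occurrence in the whole cleaned path (valid because cleaning and keywords contain no '/'), instead of A's nested loop over path parts x keywords with per-part cleaning; A's list(set(...)) has hash-dependent order, B emits the sorted list of the same set.
import Mathlib
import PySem

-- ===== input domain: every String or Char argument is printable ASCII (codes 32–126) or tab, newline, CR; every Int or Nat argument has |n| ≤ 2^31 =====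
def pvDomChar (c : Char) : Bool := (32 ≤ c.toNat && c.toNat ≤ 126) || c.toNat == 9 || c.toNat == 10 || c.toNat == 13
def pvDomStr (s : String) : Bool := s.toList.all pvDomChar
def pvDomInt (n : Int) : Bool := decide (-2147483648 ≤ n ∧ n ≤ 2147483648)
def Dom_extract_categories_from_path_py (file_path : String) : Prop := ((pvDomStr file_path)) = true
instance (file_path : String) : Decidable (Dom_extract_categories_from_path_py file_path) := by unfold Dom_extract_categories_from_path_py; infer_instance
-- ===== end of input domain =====

-- B cleans the whole lowered path once and loops only over the fixed keyword list, instead of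
-- A's nested loop over path parts × keywords; A's final list(set(..)) iteration order is Python
-- hash-seed dependent, so both ports render the result set in sorted order and B's Python
-- returns the sorted list of the same set (outputs are compared as sets).

-- the fixed keyword list both Pythons carry literally
def pvCategoryKeywords : List String :=
  ["user", "users", "product", "products", "cart", "checkout",
   "order", "orders", "payment", "login", "registration",
   "search", "navigation", "header", "footer", "account"]

-- part.replace(".json", "").replace("_", "-")  (both Pythons contain this exact expression)
def pvClean (p : List Char) : List Char :=
  PySem.Chars.replace (PySem.Chars.replace p ".json".toList "".toList) "_".toList "-".toList

-- ===== PORT A =====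
def extract_categories_from_path_py (file_path : String) : List String :=
  let path_parts := PySem.Chars.splitOn (PySem.Chars.lower file_path.toList) "/".toList
  let categories := path_parts.foldl (fun acc part =>
      let part_clean := pvClean part
      pvCategoryKeywords.foldl (fun acc keyword =>
        if PySem.Chars.isIn keyword.toList part_clean then acc ++ [keyword] else acc) acc)
    ([] : List String)
  -- Python: list(set(categories)) — set iteration order is hash-seed dependent; the port
  -- renders the set in sorted order (the behavioural comparison is as sets)
  PySem.List.sorted (PySem.Set.ofList categories) (fun x => x) false

-- ===== PORT B =====
def extract_categories_from_path_py_alt (file_path : String) : List String :=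
  let cleaned := pvClean (PySem.Chars.lower file_path.toList)
  PySem.List.sorted (pvCategoryKeywords.filter
    (fun k => PySem.Chars.isIn k.toList cleaned)) (fun x => x) false

-- ===== PRECONDITION & SPEC =====
def Spec_extract_categories_from_path_py (file_path : String) (out : List String) : Prop := out = extract_categories_from_path_py_alt file_path
instance (file_path : String) (out : List String) : Decidable (Spec_extract_categories_from_path_py file_path out) := by unfold Spec_extract_categories_from_path_py; infer_instance

-- ===== CLAIM (what is proved, stated in full; the proofs are below) =====
def Claim_equal_extract_categories_from_path_py : Prop := ∀ (file_path : String), Dom_extract_categories_from_path_py file_path → Spec_extract_categories_from_path_py file_path (extract_categories_from_path_py file_path)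

-- ===== LEMMAS AND PROOFS =====

-- structural model of s.split("/") (single-character separator)
def pvSplit : List Char → List (List Char)
  | [] => [[]]
  | c :: t => if c = '/' then [] :: pvSplit t else (pvSplit t).modifyHead (c :: ·)

-- structural model of s.replace(o :: old', new)
def pvRepl (o : Char) (old' new : List Char) : List Char → List Char
  | [] => []
  | c :: t =>
      if (o :: old').isPrefixOf (c :: t) then new ++ pvRepl o old' new (t.drop old'.length)
      else c :: pvRepl o old' new t
termination_by l => l.length
decreasing_by
  · simp only [List.length_drop, List.length_cons]; omega
  · simp only [List.length_cons]; omega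

-- every t splits as h :: tt with t = h, or t = h ++ '/' :: r
lemma pvSplit_char (t : List Char) :
    ∃ h tt, pvSplit t = h :: tt ∧ (t = h ∨ ∃ r, t = h ++ '/' :: r) := by
  induction t with
  | nil => exact ⟨[], [], rfl, Or.inl rfl⟩
  | cons c t ih =>
    by_cases hc : c = '/'
    · subst hc
      exact ⟨[], pvSplit t, by simp [pvSplit], Or.inr ⟨t, rfl⟩⟩
    · obtain ⟨h, tt, e, hd⟩ := ih
      refine ⟨c :: h, tt, by simp [pvSplit, hc, e], ?_⟩
      rcases hd with h1 | ⟨r, hr⟩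
      · exact Or.inl (by rw [h1])
      · exact Or.inr ⟨r, by rw [hr]; rfl⟩

lemma pvRepl_go (o : Char) (old' new : List Char) :
    ∀ (fuel : Nat) (l acc : List Char), l.length ≤ fuel →
      PySem.Chars.replace.go (o :: old') new fuel l acc = acc.reverse ++ pvRepl o old' new l := by
  intro fuel
  induction fuel with
  | zero =>
    intro l acc h
    cases l with
    | nil => simp [PySem.Chars.replace.go, pvRepl]
    | cons c t => simp at h
  | succ n ih =>
    intro l acc h
    cases l with
    | nil => simp [PySem.Chars.replace.go, pvRepl]
    | cons c t =>
      rw [PySem.Chars.replace.go]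
      by_cases hp : (o :: old').isPrefixOf (c :: t)
      · rw [if_pos hp]
        have hd : List.drop (o :: old').length (c :: t) = t.drop old'.length := by
          simp [List.drop_succ_cons]
        rw [hd, ih _ _ (by simp only [List.length_drop] at *; simp at h; omega)]
        simp [pvRepl, hp, List.append_assoc]
      · rw [if_neg hp, ih _ _ (by simp at h; omega)]
        simp [pvRepl, hp]

lemma replace_eq_pvRepl (o : Char) (old' new s : List Char) :
    PySem.Chars.replace s (o :: old') new = pvRepl o old' new s := by
  unfold PySem.Chars.replace
  rw [if_neg (by simp)]
  simpa using pvRepl_go o old' new (s.length) s [] le_rfl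

lemma pvSplit_go :
    ∀ (fuel : Nat) (l cur : List Char) (acc : List (List Char)), l.length < fuel →
      PySem.Chars.splitOn.go ['/'] fuel l cur acc
        = acc.reverse ++ (pvSplit l).modifyHead (cur.reverse ++ ·) := by
  intro fuel
  induction fuel with
  | zero => intro l cur acc h; omega
  | succ n ih =>
    intro l cur acc h
    cases l with
    | nil => simp [PySem.Chars.splitOn.go, pvSplit]
    | cons c t =>
      rw [PySem.Chars.splitOn.go]
      by_cases hc : c = '/'
      · rw [if_pos (by simp [hc, List.isPrefixOf])]
        rw [ih _ _ _ (by simp at h ⊢; omega)]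
        obtain ⟨hh, tt, e, -⟩ := pvSplit_char (t.drop 0)
        simp at e
        simp [pvSplit, hc, e]
      · rw [if_neg (by simp [List.isPrefixOf]; intro hcon; exact hc hcon.symm)]
        rw [ih _ _ _ (by simp at h ⊢; omega)]
        obtain ⟨hh, tt, e, -⟩ := pvSplit_char t
        simp [pvSplit, hc, e]

lemma splitOn_eq_pvSplit (s : List Char) : PySem.Chars.splitOn s ['/'] = pvSplit s := by
  unfold PySem.Chars.splitOn
  rw [pvSplit_go (s.length + 1) s [] [] (by omega)]
  obtain ⟨h, tt, e, -⟩ := pvSplit_char s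
  simp [e]

-- a '/'-free prefix of u ++ '/' :: v is a prefix of u
lemma prefix_slash : ∀ (u k v : List Char), '/' ∉ k → (k <+: u ++ '/' :: v ↔ k <+: u) := by
  intro u
  induction u with
  | nil =>
    intro k v hk
    constructor
    · intro h
      cases k with
      | nil => exact List.nil_prefix
      | cons d k' =>
        obtain ⟨h1, -⟩ := List.cons_prefix_cons.mp h
        simp [h1] at hk
    · intro h
      rw [List.prefix_nil.mp h]
      exact List.nil_prefix
  | cons c u' ih =>
    intro k v hk
    cases k with
    | nil => simp
    | cons d k' =>
      have hk' : '/' ∉ k' := fun m => hk (List.mem_cons_of_mem _ m)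
      rw [List.cons_append, List.cons_prefix_cons, List.cons_prefix_cons, ih k' v hk']

-- prepending a '/'-free block only alters the head piece of the split
lemma pvSplit_append : ∀ (u : List Char), '/' ∉ u →
    ∀ x, pvSplit (u ++ x) = (pvSplit x).modifyHead (u ++ ·) := by
  intro u
  induction u with
  | nil =>
    intro _ x
    obtain ⟨h, tt, e, -⟩ := pvSplit_char x
    simp [e]
  | cons c u' ih =>
    intro hu x
    have hc : c ≠ '/' := fun h => hu (h ▸ List.mem_cons_self ..)
    have hu' : '/' ∉ u' := fun m => hu (List.mem_cons_of_mem _ m)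
    rw [List.cons_append]
    rw [show pvSplit (c :: (u' ++ x)) = (pvSplit (u' ++ x)).modifyHead (c :: ·) by
      simp [pvSplit, hc]]
    rw [ih hu' x, List.modifyHead_modifyHead]
    congr 1

-- replace (with '/'-free pattern and replacement) commutes with split
lemma pvSplit_pvRepl (o : Char) (old' new : List Char)
    (ho : '/' ∉ o :: old') (hn : '/' ∉ new) :
    ∀ s, pvSplit (pvRepl o old' new s) = (pvSplit s).map (pvRepl o old' new) := by
  have main : ∀ (n : Nat) (s : List Char), s.length ≤ n →
      pvSplit (pvRepl o old' new s) = (pvSplit s).map (pvRepl o old' new) := by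
    intro n
    induction n with
    | zero =>
      intro s hs
      rw [List.eq_nil_of_length_eq_zero (Nat.le_zero.mp hs)]
      simp [pvRepl, pvSplit]
    | succ n ih =>
      intro s hs
      cases s with
      | nil => simp [pvRepl, pvSplit]
      | cons c t =>
        by_cases hp : (o :: old').isPrefixOf (c :: t)
        · have hpre : (o :: old') <+: (c :: t) := List.isPrefixOf_iff_prefix.mp hp
          obtain ⟨rest, hrest⟩ := hpre
          have hdrop : t.drop old'.length = rest := by
            have h2 := congrArg (List.drop (o :: old').length) hrest
            simpa [List.drop_left, List.drop_succ_cons] using h2.symm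
          have hlen : rest.length ≤ n := by
            rw [← hdrop]
            simp only [List.length_drop]
            simp only [List.length_cons] at hs
            omega
          have step : pvRepl o old' new (c :: t) = new ++ pvRepl o old' new rest := by
            rw [pvRepl, if_pos hp, hdrop]
          rw [step, pvSplit_append new hn, ih rest hlen, ← hrest,
            pvSplit_append (o :: old') ho]
          obtain ⟨h, tt, e, -⟩ := pvSplit_char rest
          have hkey : pvRepl o old' new (o :: (old' ++ h)) = new ++ pvRepl o old' new h := by
            rw [pvRepl,
              if_pos (List.isPrefixOf_iff_prefix.mpr (by rw [← List.cons_append]; exact List.prefix_append _ _)),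
              List.drop_left]
          simp [e, hkey]
        · have step : pvRepl o old' new (c :: t) = c :: pvRepl o old' new t := by
            rw [pvRepl, if_neg hp]
          have hlt : t.length ≤ n := by simp at hs; omega
          by_cases hc : c = '/'
          · subst hc
            rw [step]
            simp [pvSplit, ih t hlt, pvRepl]
          · obtain ⟨h, tt, e, hd⟩ := pvSplit_char t
            have hht : h <+: t := by
              rcases hd with h1 | ⟨r, hr⟩
              · exact h1 ▸ List.prefix_refl h
              · exact hr ▸ List.prefix_append _ _
            have hkey : pvRepl o old' new (c :: h) = c :: pvRepl o old' new h := by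
              rw [pvRepl, if_neg ?_]
              intro hcon
              exact hp (List.isPrefixOf_iff_prefix.mpr
                ((List.isPrefixOf_iff_prefix.mp hcon).trans
                  ((List.cons_prefix_cons).mpr ⟨rfl, hht⟩)))
            rw [step]
            simp only [pvSplit, if_neg hc, ih t hlt, e]
            simp [hkey]
  intro s
  exact main s.length s le_rfl

-- a '/'-free word is an infix of s iff it is an infix of some piece of the split
lemma infix_pvSplit (k : List Char) (hk : '/' ∉ k) :
    ∀ s, (∃ p ∈ pvSplit s, k <:+: p) ↔ k <:+: s := by
  intro s
  induction s with
  | nil => simp [pvSplit]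
  | cons c t ih =>
    by_cases hc : c = '/'
    · subst hc
      simp only [pvSplit, if_pos]
      constructor
      · rintro ⟨p, hp, hi⟩
        rcases List.mem_cons.mp hp with rfl | hp'
        · rw [List.infix_nil.mp hi]
          exact List.nil_infix
        · exact List.infix_cons_iff.mpr (Or.inr (ih.mp ⟨p, hp', hi⟩))
      · intro hinf
        rcases List.infix_cons_iff.mp hinf with hpre | htail
        · cases k with
          | nil => exact ⟨[], by simp, List.nil_infix⟩
          | cons d k' =>
            obtain ⟨h1, -⟩ := List.cons_prefix_cons.mp hpre
            simp [h1] at hk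
        · obtain ⟨p, hp, hi⟩ := ih.mpr htail
          exact ⟨p, List.mem_cons_of_mem _ hp, hi⟩
    · obtain ⟨h, tt, e, hd⟩ := pvSplit_char t
      have hb : (k <+: c :: t ↔ k <+: c :: h) := by
        rcases hd with h1 | ⟨r, hr⟩
        · rw [h1]
        · rw [hr, ← List.cons_append, prefix_slash (c :: h) k r hk]
      have iht : (∃ p ∈ h :: tt, k <:+: p) ↔ k <:+: t := e ▸ ih
      simp only [pvSplit, if_neg hc, e, List.modifyHead_cons]
      constructor
      · rintro ⟨p, hp, hi⟩
        rcases List.mem_cons.mp hp with rfl | hp'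
        · rcases List.infix_cons_iff.mp hi with hpre | htail
          · exact List.infix_cons_iff.mpr (Or.inl (hb.mpr hpre))
          · exact List.infix_cons_iff.mpr
              (Or.inr (iht.mp ⟨h, List.mem_cons_self .., htail⟩))
        · exact List.infix_cons_iff.mpr
            (Or.inr (iht.mp ⟨p, List.mem_cons_of_mem _ hp', hi⟩))
      · intro hi
        rcases List.infix_cons_iff.mp hi with hpre | htail
        · exact ⟨c :: h, List.mem_cons_self ..,
            List.infix_cons_iff.mpr (Or.inl (hb.mp hpre))⟩
        · obtain ⟨p, hp, hip⟩ := iht.mpr htail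
          rcases List.mem_cons.mp hp with rfl | hp'
          · exact ⟨c :: p, List.mem_cons_self ..,
              List.infix_cons_iff.mpr (Or.inr hip)⟩
          · exact ⟨p, List.mem_cons_of_mem _ hp', hip⟩

lemma pvClean_eq (p : List Char) :
    pvClean p = pvRepl '_' [] "-".toList (pvRepl '.' "json".toList [] p) := by
  unfold pvClean
  rw [show ".json".toList = '.' :: "json".toList from rfl,
    show "".toList = ([] : List Char) from rfl,
    show "_".toList = '_' :: ([] : List Char) from rfl,
    replace_eq_pvRepl, replace_eq_pvRepl]

-- the key fact: a '/'-free keyword occurs in some cleaned part iff in the cleaned whole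
lemma key_equiv (k : List Char) (hk : '/' ∉ k) (s : List Char) :
    (∃ p ∈ PySem.Chars.splitOn s ['/'], PySem.Chars.isIn k (pvClean p) = true)
      ↔ PySem.Chars.isIn k (pvClean s) = true := by
  rw [splitOn_eq_pvSplit]
  simp only [PySem.Chars.isIn_iff_infix, pvClean_eq]
  have h1 := pvSplit_pvRepl '.' "json".toList [] (by decide) (by decide)
  have h2 := pvSplit_pvRepl '_' [] "-".toList (by decide) (by decide)
  constructor
  · rintro ⟨p, hp, hi⟩
    have m1 : pvRepl '.' "json".toList [] p ∈ pvSplit (pvRepl '.' "json".toList [] s) := by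
      rw [h1 s]; exact List.mem_map_of_mem hp
    have m2 : pvRepl '_' [] "-".toList (pvRepl '.' "json".toList [] p)
        ∈ pvSplit (pvRepl '_' [] "-".toList (pvRepl '.' "json".toList [] s)) := by
      rw [h2 _]; exact List.mem_map_of_mem m1
    exact (infix_pvSplit k hk _).mp ⟨_, m2, hi⟩
  · intro hi
    obtain ⟨q, hq, hiq⟩ := (infix_pvSplit k hk _).mpr hi
    rw [h2, List.mem_map] at hq
    obtain ⟨q1, hq1, rfl⟩ := hq
    rw [h1, List.mem_map] at hq1
    obtain ⟨p, hp, rfl⟩ := hq1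
    exact ⟨p, hp, hiq⟩


-- ===== VERDICT (by name: the statement is the Claim_ definition above) =====
theorem extract_categories_from_path_py_spec : Claim_equal_extract_categories_from_path_py := by
  intro file_path _
  unfold Spec_extract_categories_from_path_py extract_categories_from_path_py
    extract_categories_from_path_py_alt
  have hkw : ∀ a ∈ pvCategoryKeywords, '/' ∉ a.toList := by decide
  simp only [PySem.List.foldl_append_if]
  simp only [List.map_id']
  rw [PySem.List.foldl_append_eq_flatMap, List.nil_append]
  apply PySem.List.sorted_eq_sorted_of_perm _ _ _ Function.injective_id
  apply (List.perm_ext_iff_of_nodup (PySem.Set.nodup_ofList _)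
    (List.Nodup.filter _ (by decide : pvCategoryKeywords.Nodup))).mpr
  intro a
  rw [PySem.Set.mem_ofList, List.mem_flatMap]
  simp only [List.mem_filter]
  rw [show "/".toList = ['/'] from rfl]
  constructor
  · rintro ⟨p, hp, ha, hi⟩
    exact ⟨ha, (key_equiv _ (hkw a ha) _).mp ⟨p, hp, hi⟩⟩
  · rintro ⟨ha, hi⟩
    obtain ⟨p, hp, hip⟩ := (key_equiv _ (hkw a ha) _).mpr hi
    exact ⟨p, hp, ha, hip⟩
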